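-- pv_equiv track=rewrite | github.com/Bleroaron/SignlanguageRecognition | components/process_videos.py | find_surrounded_false_sequences
-- ===== SOURCE A (Python) =====
-- def find_surrounded_false_sequences(data):
--     surrounding_true_indices = []
--     false_sequence = False
--     start_index = None
--     for i, (_, truthy) in enumerate(data):
--         if not truthy:
--             # If current value is False start tracking
--             if not false_sequence:
--                 false_sequence = True
--                 start_index = i
--         else:
--             # Check if its a false sequence
--             if false_sequence:
--                 # Ensure the False sequence is surrounded by True
--                 if start_index > 0 and i < len(data) and data[start_index - 1][1] and data[i][1]:
--                     surrounding_true_indices.append((start_index - 1, i))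
--                 false_sequence = False
--     return surrounding_true_indices
-- ===== SOURCE B (Python) =====
-- def find_surrounded_false_sequences(data):
--     trues = [i for i, (_, t) in enumerate(data) if t]
--     return [(a, b) for a, b in zip(trues, trues[1:]) if b > a + 1]
-- ===== Notes on version B (the rewrite author's own statement) =====
-- stated objective: simpler
-- what changed: Replaces the stateful run-tracking loop (flag + start index + backward indexing into data) by collecting the truthy positions once and pairing adjacent true indices whose gap contains a falsy run.
import Mathlib
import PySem

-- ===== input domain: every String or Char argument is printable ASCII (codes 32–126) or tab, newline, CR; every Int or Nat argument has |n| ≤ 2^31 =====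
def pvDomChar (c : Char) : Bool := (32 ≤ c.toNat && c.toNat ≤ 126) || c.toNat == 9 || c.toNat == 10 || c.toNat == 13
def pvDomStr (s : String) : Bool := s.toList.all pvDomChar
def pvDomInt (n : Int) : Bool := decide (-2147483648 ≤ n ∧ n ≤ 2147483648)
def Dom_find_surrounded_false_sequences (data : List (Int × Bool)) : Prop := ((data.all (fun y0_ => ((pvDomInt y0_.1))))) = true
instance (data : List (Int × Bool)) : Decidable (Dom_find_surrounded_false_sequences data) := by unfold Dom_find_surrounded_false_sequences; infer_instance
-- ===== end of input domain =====

-- B replaces A's stateful run-tracking loop (flag + start index + backward indexing)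
-- by pairing adjacent truthy positions with a nonempty gap; objective: simpler.

-- ===== PORT A =====
-- A's for-loop over enumerate(data) as structural recursion over the enumerated
-- list with the same state (acc, false_sequence, start_index).
-- `si.getD 0` reads start_index (always set when fs = true, matching Python);
-- `(pyGet? …).getD false` reads data[…][1] (always in range when reached, so the
-- default is never used — where Python would raise, pyGet? returns none).
def pvLoopA (data : List (Int × Bool)) :
    List (Int × (Int × Bool)) → List (Int × Int) → Bool → Option Int → List (Int × Int)
  | [], acc, _, _ => acc
  | (i, (_, truthy)) :: rest, acc, fs, si =>
    if truthy = false then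
      if fs = false then pvLoopA data rest acc true (some i)
      else pvLoopA data rest acc fs si
    else
      if fs then
        let s := si.getD 0
        if s > 0 && decide (i < (data.length : Int))
            && (((PySem.List.pyGet? data (s - 1)).map Prod.snd).getD false)
            && (((PySem.List.pyGet? data i).map Prod.snd).getD false)
        then pvLoopA data rest (acc ++ [(s - 1, i)]) false si
        else pvLoopA data rest acc false si
      else pvLoopA data rest acc fs si

def find_surrounded_false_sequences (data : List (Int × Bool)) : List (Int × Int) :=
  pvLoopA data (PySem.List.enumerate data 0) [] false none

-- ===== PORT B =====
def find_surrounded_false_sequences_alt (data : List (Int × Bool)) : List (Int × Int) :=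
  let trues := (PySem.List.enumerate data 0).filterMap
    (fun ip => if ip.2.2 then some ip.1 else none)
  (trues.zip (PySem.List.slice trues (some 1) none)).filter
    (fun ab => decide (ab.2 > ab.1 + 1))

-- ===== PRECONDITION & SPEC =====
def Spec_find_surrounded_false_sequences (data : List (Int × Bool)) (out : List (Int × Int)) : Prop := out = find_surrounded_false_sequences_alt data
instance (data : List (Int × Bool)) (out : List (Int × Int)) : Decidable (Spec_find_surrounded_false_sequences data out) := by unfold Spec_find_surrounded_false_sequences; infer_instance

-- ===== CLAIM (what is proved, stated in full; the proofs are below) =====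
def Claim_equal_find_surrounded_false_sequences : Prop := ∀ (data : List (Int × Bool)), Dom_find_surrounded_false_sequences data → Spec_find_surrounded_false_sequences data (find_surrounded_false_sequences data)

-- ===== LEMMAS AND PROOFS =====

-- common reference: scan with "index of the last truthy element seen"
def pvSpec : Option Int → List (Int × (Int × Bool)) → List (Int × Int)
  | _, [] => []
  | last, (i, (_, b)) :: rest =>
    if b then
      (match last with
       | some a => if i > a + 1 then [(a, i)] else []
       | none => []) ++ pvSpec (some i) rest
    else pvSpec last rest

def pvTrues (e : List (Int × (Int × Bool))) : List Int :=
  e.filterMap (fun ip => if ip.2.2 then some ip.1 else none)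

def pvZF (ts : List Int) : List (Int × Int) :=
  (ts.zip ts.tail).filter (fun ab => decide (ab.2 > ab.1 + 1))

def pvDsnd (data : List (Int × Bool)) (k : Nat) : Bool := (data.getD k (0, false)).2

-- state invariant of A's loop after processing the prefix `pre` of data
def pvInv (data pre : List (Int × Bool)) (fs : Bool) (si : Option Int) (last : Option Int) : Prop :=
  if fs then
    ∃ sn : Nat, si = some (sn : Int) ∧ sn < pre.length ∧
      ((0 < sn ∧ pvDsnd data (sn - 1) = true) → last = some ((sn : Int) - 1)) ∧
      (¬ (0 < sn ∧ pvDsnd data (sn - 1) = true) → last = none)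
  else
    (last = none ∧ ¬ (0 < pre.length ∧ pvDsnd data (pre.length - 1) = true)) ∨
    (0 < pre.length ∧ pvDsnd data (pre.length - 1) = true ∧ last = some ((pre.length : Int) - 1))

theorem pvInv_true_iff (data pre : List (Int × Bool)) (si last : Option Int) :
    pvInv data pre true si last ↔
      ∃ sn : Nat, si = some (sn : Int) ∧ sn < pre.length ∧
        ((0 < sn ∧ pvDsnd data (sn - 1) = true) → last = some ((sn : Int) - 1)) ∧
        (¬ (0 < sn ∧ pvDsnd data (sn - 1) = true) → last = none) := by
  simp [pvInv]

theorem pvInv_false_iff (data pre : List (Int × Bool)) (si last : Option Int) :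
    pvInv data pre false si last ↔
      ((last = none ∧ ¬ (0 < pre.length ∧ pvDsnd data (pre.length - 1) = true)) ∨
       (0 < pre.length ∧ pvDsnd data (pre.length - 1) = true ∧ last = some ((pre.length : Int) - 1))) := by
  simp [pvInv]

-- step lemmas for the two scanners
theorem pvLoopA_nil (data : List (Int × Bool)) (acc : List (Int × Int)) (fs : Bool) (si : Option Int) :
    pvLoopA data [] acc fs si = acc := rfl

theorem pvLoopA_false_notfs (data : List (Int × Bool)) (i v : Int) (e : List (Int × (Int × Bool)))
    (acc : List (Int × Int)) (si : Option Int) :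
    pvLoopA data ((i, (v, false)) :: e) acc false si = pvLoopA data e acc true (some i) := by
  simp [pvLoopA]

theorem pvLoopA_false_fs (data : List (Int × Bool)) (i v : Int) (e : List (Int × (Int × Bool)))
    (acc : List (Int × Int)) (si : Option Int) :
    pvLoopA data ((i, (v, false)) :: e) acc true si = pvLoopA data e acc true si := by
  simp [pvLoopA]

theorem pvLoopA_true_notfs (data : List (Int × Bool)) (i v : Int) (e : List (Int × (Int × Bool)))
    (acc : List (Int × Int)) (si : Option Int) :
    pvLoopA data ((i, (v, true)) :: e) acc false si = pvLoopA data e acc false si := by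
  simp [pvLoopA]

theorem pvLoopA_true_fs (data : List (Int × Bool)) (i v : Int) (e : List (Int × (Int × Bool)))
    (acc : List (Int × Int)) (si : Option Int) :
    pvLoopA data ((i, (v, true)) :: e) acc true si =
      (if (si.getD 0 > 0 && decide (i < (data.length : Int))
            && (((PySem.List.pyGet? data (si.getD 0 - 1)).map Prod.snd).getD false)
            && (((PySem.List.pyGet? data i).map Prod.snd).getD false))
       then pvLoopA data e (acc ++ [(si.getD 0 - 1, i)]) false si
       else pvLoopA data e acc false si) := by
  simp [pvLoopA]

theorem pvSpec_false (i v : Int) (e : List (Int × (Int × Bool))) (last : Option Int) :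
    pvSpec last ((i, (v, false)) :: e) = pvSpec last e := by
  simp [pvSpec]

theorem pvSpec_true_none (i v : Int) (e : List (Int × (Int × Bool))) :
    pvSpec none ((i, (v, true)) :: e) = pvSpec (some i) e := by
  simp [pvSpec]

theorem pvSpec_true_some (i v a : Int) (e : List (Int × (Int × Bool))) :
    pvSpec (some a) ((i, (v, true)) :: e) =
      (if i > a + 1 then [(a, i)] else []) ++ pvSpec (some i) e := by
  simp [pvSpec]

theorem pvZF_cons_cons (a b : Int) (l : List Int) :
    pvZF (a :: b :: l) = (if b > a + 1 then [(a, b)] else []) ++ pvZF (b :: l) := by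
  simp only [pvZF, List.tail_cons, List.zip_cons_cons, List.filter_cons]
  split_ifs <;> simp_all

theorem pvTrues_cons_true (i v : Int) (e : List (Int × (Int × Bool))) :
    pvTrues ((i, (v, true)) :: e) = i :: pvTrues e := by
  simp [pvTrues]

theorem pvTrues_cons_false (i v : Int) (e : List (Int × (Int × Bool))) :
    pvTrues ((i, (v, false)) :: e) = pvTrues e := by
  simp [pvTrues]

theorem pvSpec_eq_zf (e : List (Int × (Int × Bool))) (last : Option Int) :
    pvSpec last e = pvZF (last.toList ++ pvTrues e) := by
  induction e generalizing last with
  | nil =>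
    cases last <;> simp [pvSpec, pvTrues, pvZF]
  | cons hd tl ih =>
    obtain ⟨i, w, b⟩ := hd
    by_cases hb : b
    · subst hb
      cases last with
      | none =>
        rw [pvSpec_true_none, pvTrues_cons_true, ih (some i)]
        rfl
      | some a =>
        rw [pvSpec_true_some, pvTrues_cons_true, ih (some i)]
        have h2 : ((some a).toList : List Int) ++ i :: pvTrues tl = a :: i :: pvTrues tl := rfl
        rw [h2, pvZF_cons_cons]
        rfl
    · have hb' : b = false := by simpa using hb
      subst hb'
      rw [pvSpec_false, pvTrues_cons_false, ih last]

theorem pvLoopA_eq_spec (data : List (Int × Bool)) (l pre : List (Int × Bool))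
    (acc : List (Int × Int)) (fs : Bool) (si last : Option Int)
    (hdata : data = pre ++ l) (hinv : pvInv data pre fs si last) :
    pvLoopA data (PySem.List.enumerate l (pre.length : Int)) acc fs si
      = acc ++ pvSpec last (PySem.List.enumerate l (pre.length : Int)) := by
  induction l generalizing pre acc fs si last with
  | nil => simp [PySem.List.enumerate_nil, pvLoopA_nil, pvSpec]
  | cons x rest ih =>
    obtain ⟨v, b⟩ := x
    have hget : PySem.List.pyGet? data (pre.length : Int) = some (v, b) := by
      rw [hdata]; exact PySem.List.pyGet?_append_length _ _ _
    have hgetE : data[pre.length]? = some (v, b) := by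
      rw [hdata, List.getElem?_append_right (le_refl _)]; simp
    have hdsnd_cur : pvDsnd data pre.length = b := by
      simp [pvDsnd, List.getD_eq_getElem?_getD, hgetE]
    have hcast : ((pre.length + 1 : Nat) : Int) = (pre.length : Int) + 1 := by push_cast; ring
    have hpre1 : ((pre ++ [(v, b)]).length : Int) = (pre.length : Int) + 1 := by
      simp
    rw [PySem.List.enumerate_cons]
    by_cases hb : b
    · -- current element truthy
      subst hb
      by_cases hfs : fs
      · subst hfs
        rw [pvInv_true_iff] at hinv
        obtain ⟨sn, hsi, hsn_lt, hlast_t, hlast_f⟩ := hinv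
        have hs : si.getD 0 = (sn : Int) := by rw [hsi]; rfl
        rw [pvLoopA_true_fs]
        by_cases hcond : 0 < sn ∧ pvDsnd data (sn - 1) = true
        · have hlast := hlast_t hcond
          have hsm1 : ((sn : Int) - 1) = (((sn - 1 : Nat)) : Int) := by omega
          have hlen1 : sn - 1 < data.length := by
            rw [hdata]; simp only [List.length_append, List.length_cons]; omega
          have hget1 : PySem.List.pyGet? data ((sn : Int) - 1) = some (data.getD (sn - 1) (0, false)) := by
            rw [hsm1, PySem.List.pyGet?_natCast, List.getElem?_eq_getElem hlen1,
              List.getD_eq_getElem?_getD, List.getElem?_eq_getElem hlen1]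
            rfl
          have hlt : ((pre.length : Int) < (data.length : Int)) := by
            rw [hdata]; simp only [List.length_append, List.length_cons]; push_cast; omega
          have hAcond : (si.getD 0 > 0 && decide ((pre.length : Int) < (data.length : Int))
              && (((PySem.List.pyGet? data (si.getD 0 - 1)).map Prod.snd).getD false)
              && (((PySem.List.pyGet? data (pre.length : Int)).map Prod.snd).getD false)) = true := by
            rw [hs, hget1, hget]
            have h2 := hcond.2
            simp only [pvDsnd, List.getD_eq_getElem?_getD] at h2
            simp [hlt, h2, hcond.1, List.getD_eq_getElem?_getD]
          rw [hAcond]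
          simp only [hs, hlast]
          rw [pvSpec_true_some]
          have hgap : ((pre.length : Int) > ((sn : Int) - 1) + 1) := by
            have : sn < pre.length := hsn_lt; omega
          rw [if_pos hgap]
          have hrec := ih (pre ++ [(v, true)]) (acc ++ [((sn : Int) - 1, (pre.length : Int))])
            false si (some (pre.length : Int))
            (by rw [hdata]; simp)
            (by
              rw [pvInv_false_iff]
              right
              refine ⟨by simp, ?_, by rw [hpre1]; norm_num⟩
              have : (pre ++ [(v, true)]).length - 1 = pre.length := by simp
              rw [this]
              simpa using hdsnd_cur)
          rw [hpre1] at hrec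
          rw [hrec]
          simp
        · have hlast := hlast_f hcond
          have hAcond : (si.getD 0 > 0 && decide ((pre.length : Int) < (data.length : Int))
              && (((PySem.List.pyGet? data (si.getD 0 - 1)).map Prod.snd).getD false)
              && (((PySem.List.pyGet? data (pre.length : Int)).map Prod.snd).getD false)) = false := by
            rw [hs]
            by_cases h0 : 0 < sn
            · have h2 : pvDsnd data (sn - 1) ≠ true := fun h => hcond ⟨h0, h⟩
              have hsm1 : ((sn : Int) - 1) = (((sn - 1 : Nat)) : Int) := by omega
              have hlen1 : sn - 1 < data.length := by
                rw [hdata]; simp only [List.length_append, List.length_cons]; omega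
              have hget1 : PySem.List.pyGet? data ((sn : Int) - 1) = some (data.getD (sn - 1) (0, false)) := by
                rw [hsm1, PySem.List.pyGet?_natCast, List.getElem?_eq_getElem hlen1,
                  List.getD_eq_getElem?_getD, List.getElem?_eq_getElem hlen1]
                rfl
              rw [hget1]
              simp only [pvDsnd, Bool.not_eq_true, List.getD_eq_getElem?_getD] at h2
              simp [h2, List.getD_eq_getElem?_getD]
            · have hz : sn = 0 := by omega
              simp [hz]
          rw [hAcond]
          simp only [Bool.false_eq_true, if_false, hlast]
          rw [pvSpec_true_none]
          have hrec := ih (pre ++ [(v, true)]) acc false si (some (pre.length : Int))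
            (by rw [hdata]; simp)
            (by
              rw [pvInv_false_iff]
              right
              refine ⟨by simp, ?_, by rw [hpre1]; norm_num⟩
              have : (pre ++ [(v, true)]).length - 1 = pre.length := by simp
              rw [this]
              simpa using hdsnd_cur)
          rw [hpre1] at hrec
          exact hrec
      · -- fs = false, truthy: no emit, last becomes current index
        have hfs' : fs = false := by simpa using hfs
        subst hfs'
        rw [pvInv_false_iff] at hinv
        rw [pvLoopA_true_notfs]
        have hnoemit : pvSpec last (((pre.length : Int), (v, true)) :: PySem.List.enumerate rest ((pre.length : Int) + 1))
            = pvSpec (some (pre.length : Int)) (PySem.List.enumerate rest ((pre.length : Int) + 1)) := by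
          rcases hinv with ⟨hl, _⟩ | ⟨hpos, _, hl⟩
          · rw [hl, pvSpec_true_none]
          · rw [hl, pvSpec_true_some]
            have : ¬ ((pre.length : Int) > ((pre.length : Int) - 1) + 1) := by omega
            rw [if_neg this]
            simp
        rw [hnoemit]
        have hrec := ih (pre ++ [(v, true)]) acc false si (some (pre.length : Int))
          (by rw [hdata]; simp)
          (by
            rw [pvInv_false_iff]
            right
            refine ⟨by simp, ?_, by rw [hpre1]; norm_num⟩
            have : (pre ++ [(v, true)]).length - 1 = pre.length := by simp
            rw [this]
            simpa using hdsnd_cur)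
        rw [hpre1] at hrec
        exact hrec
    · -- current element falsy
      have hb' : b = false := by simpa using hb
      subst hb'
      by_cases hfs : fs
      · subst hfs
        rw [pvInv_true_iff] at hinv
        obtain ⟨sn, hsi, hsn_lt, hlast_t, hlast_f⟩ := hinv
        rw [pvLoopA_false_fs, pvSpec_false]
        have hrec := ih (pre ++ [(v, false)]) acc true si last
          (by rw [hdata]; simp)
          (by
            rw [pvInv_true_iff]
            exact ⟨sn, hsi, by simp only [List.length_append, List.length_cons, List.length_nil]; omega,
              hlast_t, hlast_f⟩)
        rw [hpre1] at hrec
        exact hrec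
      · have hfs' : fs = false := by simpa using hfs
        subst hfs'
        rw [pvInv_false_iff] at hinv
        rw [pvLoopA_false_notfs, pvSpec_false]
        have hrec := ih (pre ++ [(v, false)]) acc true (some (pre.length : Int)) last
          (by rw [hdata]; simp)
          (by
            rw [pvInv_true_iff]
            refine ⟨pre.length, rfl, by simp, ?_, ?_⟩
            · intro hc
              rcases hinv with ⟨_, hn⟩ | ⟨_, _, hl⟩
              · exact absurd hc hn
              · exact hl
            · intro hc
              rcases hinv with ⟨hl, _⟩ | ⟨hpos, hd, _⟩
              · exact hl
              · exact absurd ⟨hpos, hd⟩ hc)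
        rw [hpre1] at hrec
        exact hrec

-- ===== VERDICT (by name: the statement is the Claim_ definition above) =====
theorem find_surrounded_false_sequences_spec : Claim_equal_find_surrounded_false_sequences := by
  intro data _
  show find_surrounded_false_sequences data = find_surrounded_false_sequences_alt data
  unfold find_surrounded_false_sequences find_surrounded_false_sequences_alt
  have hA := pvLoopA_eq_spec data data [] [] false none none (by simp)
    (by rw [pvInv_false_iff]; left; simp)
  simp only [List.length_nil, Nat.cast_zero] at hA
  rw [hA, pvSpec_eq_zf]
  simp only [Option.toList, List.nil_append]
  rw [PySem.List.slice_from_one]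
  rfl
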